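-- pv_equiv track=rewrite | github.com/rtk-rnjn/algorithms | Algorithms/Python/recursive_matrix_multiplication.py | merge_matrices
-- ===== SOURCE A (Python) =====
-- import itertools
--
-- def merge_matrices(A: list[list[int]], B: list[list[int]], C: list[list[int]], D: list[list[int]]) -> list[list[int]]:
--     """Merge four matrices into one."""
--     n = len(A)
--     M = [[0] * n * 2 for _ in range(n * 2)]
--     for i, j in itertools.product(range(n), range(n)):
--         M[i][j] = A[i][j]
--         M[i][j + n] = B[i][j]
--         M[i + n][j] = C[i][j]
--         M[i + n][j + n] = D[i][j]
--     return M
-- ===== SOURCE B (Python) =====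
-- def merge_matrices(A: list[list[int]], B: list[list[int]], C: list[list[int]], D: list[list[int]]) -> list[list[int]]:
--     """Merge four n-by-n matrices into one block matrix by row concatenation."""
--     n = len(A)
--     top = [A[i][:n] + B[i][:n] for i in range(n)]
--     bottom = [C[i][:n] + D[i][:n] for i in range(n)]
--     return top + bottom
-- ===== Notes on version B (the rewrite author's own statement) =====
-- stated objective: simpler
-- what changed: B builds the block matrix by concatenating whole rows (top half A[i]+B[i], bottom half C[i]+D[i]) instead of preallocating a 2n x 2n zero matrix and assigning every cell individually in a nested itertools.product loop.
import Mathlib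
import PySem

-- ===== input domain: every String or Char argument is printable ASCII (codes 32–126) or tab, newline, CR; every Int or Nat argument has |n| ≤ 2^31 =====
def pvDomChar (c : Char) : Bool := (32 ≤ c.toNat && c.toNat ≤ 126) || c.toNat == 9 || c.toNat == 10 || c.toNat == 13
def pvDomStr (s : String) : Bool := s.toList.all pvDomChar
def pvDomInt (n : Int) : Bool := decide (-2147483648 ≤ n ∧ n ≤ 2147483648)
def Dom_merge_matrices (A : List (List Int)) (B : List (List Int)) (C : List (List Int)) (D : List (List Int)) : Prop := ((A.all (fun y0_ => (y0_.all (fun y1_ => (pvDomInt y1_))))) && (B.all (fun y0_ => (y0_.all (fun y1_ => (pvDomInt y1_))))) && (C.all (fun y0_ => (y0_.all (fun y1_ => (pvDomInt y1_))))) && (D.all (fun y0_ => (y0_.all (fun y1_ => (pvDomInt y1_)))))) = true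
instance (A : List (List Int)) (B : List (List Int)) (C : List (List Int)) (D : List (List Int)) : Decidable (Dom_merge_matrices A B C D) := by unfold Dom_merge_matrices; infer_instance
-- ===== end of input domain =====

-- B builds the block matrix by row concatenation instead of A's preallocate-and-assign nested loop; same cost, simpler.

-- ===== PORT A =====
-- M[i][j] = v  (list assignment; indices are always in range where A's Python Pre_ holds)
def pvSetEntry (M : List (List Int)) (i j : Nat) (v : Int) : List (List Int) :=
  M.modify i (fun row => row.set j v)

-- one iteration of A's product loop: the four assignments for the pair p = (i, j)
def pvStepA (A B C D : List (List Int)) (n : Nat) (M : List (List Int)) (p : Nat × Nat) : List (List Int) :=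
  let M1 := pvSetEntry M p.1 p.2 ((A.getD p.1 []).getD p.2 0)
  let M2 := pvSetEntry M1 p.1 (p.2 + n) ((B.getD p.1 []).getD p.2 0)
  let M3 := pvSetEntry M2 (p.1 + n) p.2 ((C.getD p.1 []).getD p.2 0)
  pvSetEntry M3 (p.1 + n) (p.2 + n) ((D.getD p.1 []).getD p.2 0)

def merge_matrices (A : List (List Int)) (B : List (List Int)) (C : List (List Int)) (D : List (List Int)) : List (List Int) :=
  -- n = len(A); M = [[0] * n * 2 for _ in range(n * 2)];
  -- for i, j in itertools.product(range(n), range(n)): the four assignments (pvStepA)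
  ((List.range A.length).flatMap (fun i => (List.range A.length).map (fun j => (i, j)))).foldl
    (pvStepA A B C D A.length)
    (List.replicate (A.length * 2) (List.replicate (A.length * 2) (0 : Int)))

-- ===== PORT B =====
-- row[:n] with n = len(A) ≥ 0 is List.take n
def merge_matrices_alt (A : List (List Int)) (B : List (List Int)) (C : List (List Int)) (D : List (List Int)) : List (List Int) :=
  -- top = [A[i][:n] + B[i][:n] for i in range(n)]; bottom likewise; return top + bottom
  ((List.range A.length).map (fun i => (A.getD i []).take A.length ++ (B.getD i []).take A.length)) ++
  ((List.range A.length).map (fun i => (C.getD i []).take A.length ++ (D.getD i []).take A.length))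

-- ===== PRECONDITION & SPEC =====
-- Pre_ is exactly the set of inputs on which the Python A returns (elsewhere A raises IndexError):
-- B, C, D must have at least n = len(A) rows and the first n rows of all four matrices must have length ≥ n.
def Pre_merge_matrices (A : List (List Int)) (B : List (List Int)) (C : List (List Int)) (D : List (List Int)) : Prop :=
  A.length ≤ B.length ∧ A.length ≤ C.length ∧ A.length ≤ D.length ∧
  ∀ i < A.length, A.length ≤ (A.getD i []).length ∧ A.length ≤ (B.getD i []).length ∧
                  A.length ≤ (C.getD i []).length ∧ A.length ≤ (D.getD i []).length
instance (A : List (List Int)) (B : List (List Int)) (C : List (List Int)) (D : List (List Int)) : Decidable (Pre_merge_matrices A B C D) := by unfold Pre_merge_matrices; infer_instance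

def pvWitness_merge_matrices : List (List Int) × List (List Int) × List (List Int) × List (List Int) :=
  ([[1, 2], [3, 4]], [[5, 6], [7, 8]], [[9, 10], [11, 12]], [[13, 14], [15, 16]])

def Spec_merge_matrices (A : List (List Int)) (B : List (List Int)) (C : List (List Int)) (D : List (List Int)) (out : List (List Int)) : Prop := out = merge_matrices_alt A B C D
instance (A : List (List Int)) (B : List (List Int)) (C : List (List Int)) (D : List (List Int)) (out : List (List Int)) : Decidable (Spec_merge_matrices A B C D out) := by unfold Spec_merge_matrices; infer_instance

-- ===== CLAIM (what is proved, stated in full; the proofs are below) =====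
def Claim_equal_merge_matrices : Prop := ∀ (A : List (List Int)) (B : List (List Int)) (C : List (List Int)) (D : List (List Int)), Dom_merge_matrices A B C D → Pre_merge_matrices A B C D → Spec_merge_matrices A B C D (merge_matrices A B C D)

-- ===== LEMMAS AND PROOFS =====

-- entry access M[r][c] with out-of-range defaulting to 0 (indices are in range wherever used)
def pvE (M : List (List Int)) (r c : Nat) : Int := (M.getD r []).getD c 0

-- the value A's loop writes at cell (r, c) of the result
def pvBlk (A B C D : List (List Int)) (n r c : Nat) : Int :=
  if r < n then
    (if c < n then (A.getD r []).getD c 0 else (B.getD r []).getD (c - n) 0)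
  else
    (if c < n then (C.getD (r - n) []).getD c 0 else (D.getD (r - n) []).getD (c - n) 0)

lemma length_setEntry (M : List (List Int)) (i j : Nat) (v : Int) :
    (pvSetEntry M i j v).length = M.length := by
  simp [pvSetEntry]

lemma row_length_setEntry (M : List (List Int)) (i j : Nat) (v : Int) (r : Nat) :
    ((pvSetEntry M i j v).getD r []).length = ((M.getD r []).length) := by
  simp only [pvSetEntry, List.getD, List.getElem?_modify]
  cases h : M[r]? with
  | none => simp [Ne.symm, *]
  | some row =>
    by_cases hir : i = r <;> simp [hir, h]

lemma E_setEntry (M : List (List Int)) (i j : Nat) (v : Int) (r c : Nat) :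
    pvE (pvSetEntry M i j v) r c =
      if r = i ∧ c = j ∧ i < M.length ∧ j < (M.getD i []).length then v
      else pvE M r c := by
  simp only [pvE, pvSetEntry, List.getD, List.getElem?_modify]
  by_cases hri : r = i
  · subst hri
    cases h : M[r]? with
    | none =>
      have hnr : M.length ≤ r := List.getElem?_eq_none_iff.mp h
      rw [if_neg (by rintro ⟨-, -, hlt, -⟩; omega)]
      simp
    | some row =>
      have hlt : r < M.length := (List.getElem?_eq_some_iff.mp h).1
      simp only [h, Option.map_eq_map, Option.map_some, if_true, Option.getD_some,
        List.getElem?_set, true_and]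
      by_cases hjc : j = c
      · subst hjc
        by_cases hj : j < row.length
        · rw [if_pos rfl, if_pos hj, if_pos ⟨rfl, hlt, hj⟩, Option.getD_some]
        · rw [if_pos rfl, if_neg hj, if_neg (by rintro ⟨-, -, hh⟩; exact hj hh), Option.getD_none,
              List.getElem?_eq_none_iff.mpr (by omega), Option.getD_none]
      · rw [if_neg hjc, if_neg (by rintro ⟨hh, -⟩; exact hjc hh.symm)]
  · rw [if_neg (by rintro ⟨hh, -⟩; exact hri hh)]
    cases h : M[r]? with
    | none => simp
    | some row =>
      simp only [h, Option.map_eq_map, Option.map_some,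
        if_neg (fun hh : i = r => hri hh.symm), Option.getD_some]

set_option maxHeartbeats 2000000 in
lemma E_step (A B C D : List (List Int)) (n : Nat) (M : List (List Int))
    (hlen : M.length = 2 * n) (hrow : ∀ r, r < 2 * n → ((M.getD r []).length) = 2 * n)
    (q : Nat × Nat) (hq1 : q.1 < n) (hq2 : q.2 < n) (r c : Nat) (hr : r < 2 * n) (hc : c < 2 * n) :
    pvE (pvStepA A B C D n M q) r c =
      if ((if r < n then r else r - n), (if c < n then c else c - n)) = q
      then pvBlk A B C D n r c else pvE M r c := by
  have l1 := length_setEntry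
  have l2 := row_length_setEntry
  have hL1 : (pvSetEntry M q.1 q.2 ((A.getD q.1 []).getD q.2 0)).length = 2 * n := by
    rw [l1, hlen]
  simp only [pvStepA]
  rw [E_setEntry, E_setEntry, E_setEntry, E_setEntry]
  simp only [l1, l2, hlen, hrow q.1 (by omega), hrow (q.1 + n) (by omega)]
  have hA : q.1 < 2 * n := by omega
  have hB : q.1 + n < 2 * n := by omega
  have hj1 : q.2 < 2 * n := by omega
  have hj2 : q.2 + n < 2 * n := by omega
  rcases q with ⟨qi, qj⟩
  simp only [] at *
  by_cases h1 : r < n <;> by_cases h2 : c < n <;>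
    simp only [pvBlk, h1, h2, if_pos, Prod.mk.injEq] <;>
    split_ifs <;> simp_all <;> omega

lemma shape_step (A B C D : List (List Int)) (n : Nat) (M : List (List Int)) (q : Nat × Nat) :
    (pvStepA A B C D n M q).length = M.length ∧
    ∀ r, ((pvStepA A B C D n M q).getD r []).length = (M.getD r []).length := by
  refine ⟨by simp [pvStepA, length_setEntry], fun r => ?_⟩
  simp only [pvStepA]
  rw [row_length_setEntry, row_length_setEntry, row_length_setEntry, row_length_setEntry]

lemma fold_entry (A B C D : List (List Int)) (n : Nat) (L : List (Nat × Nat))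
    (hL : ∀ q ∈ L, q.1 < n ∧ q.2 < n)
    (M : List (List Int)) (hlen : M.length = 2 * n)
    (hrow : ∀ r, r < 2 * n → ((M.getD r []).length) = 2 * n)
    (r c : Nat) (hr : r < 2 * n) (hc : c < 2 * n) :
    pvE (L.foldl (pvStepA A B C D n) M) r c =
      if ((if r < n then r else r - n), (if c < n then c else c - n)) ∈ L
      then pvBlk A B C D n r c else pvE M r c := by
  induction L generalizing M with
  | nil => simp
  | cons q L ih =>
    have hq := hL q (List.mem_cons_self)
    have hstep := shape_step A B C D n M q
    have hlen' : (pvStepA A B C D n M q).length = 2 * n := by rw [hstep.1, hlen]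
    have hrow' : ∀ s, s < 2 * n → (((pvStepA A B C D n M q).getD s []).length) = 2 * n := by
      intro s hs; rw [hstep.2 s]; exact hrow s hs
    have := ih (fun p hp => hL p (List.mem_cons_of_mem _ hp)) (pvStepA A B C D n M q) hlen' hrow'
    rw [List.foldl_cons, this]
    rw [E_step A B C D n M hlen hrow q hq.1 hq.2 r c hr hc]
    by_cases hmem : ((if r < n then r else r - n), (if c < n then c else c - n)) ∈ L
    · simp [hmem]
    · by_cases heq : ((if r < n then r else r - n), (if c < n then c else c - n)) = q
      · simp [heq]
      · simp [hmem, heq]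

lemma shape_fold (A B C D : List (List Int)) (n : Nat) (L : List (Nat × Nat)) (M : List (List Int)) :
    (L.foldl (pvStepA A B C D n) M).length = M.length ∧
    ∀ r, ((L.foldl (pvStepA A B C D n) M).getD r []).length = (M.getD r []).length := by
  induction L generalizing M with
  | nil => simp
  | cons q L ih =>
    have h1 := shape_step A B C D n M q
    have h2 := ih (pvStepA A B C D n M q)
    exact ⟨by rw [List.foldl_cons, h2.1, h1.1], fun r => by rw [List.foldl_cons, h2.2 r, h1.2 r]⟩

lemma mem_product_pairs (n i j : Nat) :
    ((i, j) ∈ (List.range n).flatMap (fun i => (List.range n).map (fun j => (i, j)))) ↔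
      (i < n ∧ j < n) := by
  simp [List.mem_flatMap, List.mem_range]

lemma getElem?_eq_some_getD {α : Type} (l : List α) (d : α) (i : Nat) (h : i < l.length) :
    l[i]? = some (l.getD i d) := by
  rw [List.getElem?_eq_getElem h, List.getD_eq_getElem _ _ h]

lemma alt_row_getElem? (X Y : List Int) (n c : Nat) (hX : n ≤ X.length) (hY : n ≤ Y.length) :
    (X.take n ++ Y.take n)[c]? =
      if c < n then some (X.getD c 0) else if c < 2 * n then some (Y.getD (c - n) 0) else none := by
  rw [List.getElem?_append]
  simp only [List.getElem?_take, List.length_take, Nat.min_eq_left hX]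
  by_cases h1 : c < n
  · rw [if_pos h1, if_pos h1, if_pos h1, getElem?_eq_some_getD X 0 c (by omega)]
  · rw [if_neg h1, if_neg h1]
    by_cases h2 : c < 2 * n
    · rw [if_pos (show c - n < n by omega), if_pos h2, getElem?_eq_some_getD Y 0 (c - n) (by omega)]
    · rw [if_neg (show ¬ c - n < n by omega), if_neg h2]

-- ===== VERDICT (by name: the statement is the Claim_ definition above) =====
theorem merge_matrices_spec : Claim_equal_merge_matrices := by
  intro A B C D _ hpre
  obtain ⟨hB, hC, hD, hrows⟩ := hpre
  unfold Spec_merge_matrices merge_matrices merge_matrices_alt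
  set n := A.length with hn
  set L := (List.range n).flatMap (fun i => (List.range n).map (fun j => (i, j))) with hLdef
  set M0 := List.replicate (n * 2) (List.replicate (n * 2) (0 : Int)) with hM0def
  have hM0len : M0.length = 2 * n := by rw [hM0def]; simp [Nat.mul_comm]
  have hM0row : ∀ r, r < 2 * n → ((M0.getD r []).length) = 2 * n := by
    intro r hr
    rw [hM0def]
    simp [List.getD, show r < n * 2 by omega, Nat.mul_comm]
  have hshape := shape_fold A B C D n L M0
  have hlen : (L.foldl (pvStepA A B C D n) M0).length = 2 * n := by rw [hshape.1, hM0len]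
  have hrowlen : ∀ r, r < 2 * n → (((L.foldl (pvStepA A B C D n) M0).getD r []).length) = 2 * n :=
    fun r hr => by rw [hshape.2 r]; exact hM0row r hr
  have hLmem : ∀ q ∈ L, q.1 < n ∧ q.2 < n := by
    rintro ⟨qi, qj⟩ hq
    exact (mem_product_pairs n qi qj).mp (by rwa [hLdef] at hq)
  have hE : ∀ r c, r < 2 * n → c < 2 * n →
      pvE (L.foldl (pvStepA A B C D n) M0) r c = pvBlk A B C D n r c := by
    intro r c hr hc
    rw [fold_entry A B C D n L hLmem M0 hM0len hM0row r c hr hc, if_pos]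
    rw [hLdef, mem_product_pairs]
    constructor <;> split_ifs <;> omega
  apply List.ext_getElem?
  intro r
  rw [List.getElem?_append]
  simp only [List.length_map, List.length_range, List.getElem?_map]
  by_cases hrn : r < n
  · rw [if_pos hrn, List.getElem?_range hrn, Option.map_some]
    rw [getElem?_eq_some_getD _ ([] : List Int) r (by rw [hlen]; omega)]
    congr 1
    apply List.ext_getElem?
    intro c
    rw [alt_row_getElem? _ _ n c (hrows r hrn).1 (hrows r hrn).2.1]
    by_cases hc : c < 2 * n
    · rw [getElem?_eq_some_getD _ (0 : Int) c (by rw [hrowlen r (by omega)]; exact hc)]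
      rw [show ((L.foldl (pvStepA A B C D n) M0).getD r []).getD c 0 =
            pvE (L.foldl (pvStepA A B C D n) M0) r c from rfl,
          hE r c (by omega) hc, pvBlk, if_pos hrn]
      by_cases hcn : c < n
      · rw [if_pos hcn, if_pos hcn]
      · rw [if_neg hcn, if_neg hcn, if_pos hc]
    · rw [List.getElem?_eq_none (by rw [hrowlen r (by omega)]; omega),
          if_neg (by omega), if_neg hc]
  · rw [if_neg hrn]
    by_cases hr2 : r < 2 * n
    · rw [List.getElem?_range (show r - n < n by omega), Option.map_some]
      rw [getElem?_eq_some_getD _ ([] : List Int) r (by rw [hlen]; omega)]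
      congr 1
      apply List.ext_getElem?
      intro c
      rw [alt_row_getElem? _ _ n c (hrows (r - n) (by omega)).2.2.1 (hrows (r - n) (by omega)).2.2.2]
      by_cases hc : c < 2 * n
      · rw [getElem?_eq_some_getD _ (0 : Int) c (by rw [hrowlen r hr2]; exact hc)]
        rw [show ((L.foldl (pvStepA A B C D n) M0).getD r []).getD c 0 =
              pvE (L.foldl (pvStepA A B C D n) M0) r c from rfl,
            hE r c hr2 hc, pvBlk, if_neg hrn]
        by_cases hcn : c < n
        · rw [if_pos hcn, if_pos hcn]
        · rw [if_neg hcn, if_neg hcn, if_pos hc]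
      · rw [List.getElem?_eq_none (by rw [hrowlen r hr2]; omega),
            if_neg (by omega), if_neg hc]
    · rw [List.getElem?_eq_none (l := L.foldl (pvStepA A B C D n) M0) (by rw [hlen]; omega),
          List.getElem?_eq_none (l := List.range n) (by rw [List.length_range]; omega),
          Option.map_none]
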